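-- pv_equiv track=rewrite | github.com/chiarap2/RAG-Trip | src/spatial_module/enrichment.py | categorize_pois
-- ===== SOURCE A (Python) =====
-- def categorize_pois(poi_list):
--     mapping = {
--         "art_centre": "tourism",
--         "bakery": "amenity",
--         "bar": "amenity",
--         "biergarten": "amenity",
--         "bench": "amenity",
--         "books": "shop",
--         "cafe": "amenity",
--         "castle": "tourism",
--         "cinema": "amenity",
--         "church": "place_of_worship",
--         "clothes": "shop",
--         "convenience": "shop",
--         "dance": "leisure",
--         "drinking_water": "amenity",
--         "fast_food": "amenity",
--         "fountain": "amenity",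
--         "gallery": "tourism",
--         "garden": "leisure",
--         "ice_cream": "amenity",
--         "information": "tourism",
--         "monument": "tourism",
--         "museum": "tourism",
--         "nature_reserve": "leisure",
--         "nightclub": "amenity",
--         "park": "leisure",
--         "pitch": "leisure",
--         "place_of_worship": "place_of_worship",
--         "pub": "amenity",
--         "restaurant": "amenity",
--         "shop": "shop",
--         "sports_centre": "leisure",
--         "stadium": "leisure",
--         "supermarket": "shop",
--         "temple": "place_of_worship",
--         "toilets": "amenity"
--     }
--
--     categorized = {}
--     for poi in poi_list:
--         key = mapping.get(poi)
--         if key: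
--             categorized.setdefault(key, []).append(poi)
--         else:
--             categorized.setdefault("unknown", []).append(poi)
--     return categorized
-- ===== SOURCE B (Python) =====
-- def categorize_pois(poi_list):
--     groups = {
--         "tourism": ["art_centre", "castle", "gallery", "information",
--                     "monument", "museum"],
--         "amenity": ["bakery", "bar", "biergarten", "bench", "cafe", "cinema",
--                     "drinking_water", "fast_food", "fountain", "ice_cream",
--                     "nightclub", "pub", "restaurant", "toilets"],
--         "shop": ["books", "clothes", "convenience", "shop", "supermarket"],
--         "place_of_worship": ["church", "place_of_worship", "temple"],
--         "leisure": ["dance", "garden", "nature_reserve", "park", "pitch",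
--                     "sports_centre", "stadium"],
--     }
--
--     def category(p):
--         for c, members in groups.items():
--             if p in members:
--                 return c
--         return "unknown"
--
--     pairs = [(category(p), p) for p in poi_list]
--     seen = []
--     for c, _ in pairs:
--         if c not in seen:
--             seen.append(c)
--     return {c: [p for cc, p in pairs if cc == c] for c in seen}
-- ===== Notes on version B (the rewrite author's own statement) =====
-- stated objective: alternative
-- what changed: Replaces A's poi-to-category dict and incremental setdefault/append bucketing loop with an inverse category table (category -> member POIs) scanned per POI, then a category-major build: map each POI to its category, collect first-occurrence category order, and construct each group with one filter pass.
import Mathlib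
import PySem

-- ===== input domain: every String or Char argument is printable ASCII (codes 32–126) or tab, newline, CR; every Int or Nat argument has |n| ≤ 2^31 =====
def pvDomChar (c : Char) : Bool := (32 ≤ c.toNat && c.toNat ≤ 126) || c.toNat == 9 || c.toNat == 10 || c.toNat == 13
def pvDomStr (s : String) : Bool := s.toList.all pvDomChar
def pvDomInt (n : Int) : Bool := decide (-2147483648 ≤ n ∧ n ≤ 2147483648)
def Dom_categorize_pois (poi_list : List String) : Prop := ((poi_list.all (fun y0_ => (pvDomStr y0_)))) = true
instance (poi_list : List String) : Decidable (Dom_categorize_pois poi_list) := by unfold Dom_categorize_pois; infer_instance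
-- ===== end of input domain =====

-- B replaces A's poi→category dict + setdefault/append bucketing loop by an inverse
-- category table scanned per POI and a category-major build (first-occurrence order,
-- one filter per category). Alternative decomposition, same result.

-- ===== PORT A =====
-- A's literal poi → category mapping dict
def pvMapping : PySem.Dict String String := PySem.Dict.mk [
  ("art_centre", "tourism"), ("bakery", "amenity"), ("bar", "amenity"),
  ("biergarten", "amenity"), ("bench", "amenity"), ("books", "shop"),
  ("cafe", "amenity"), ("castle", "tourism"), ("cinema", "amenity"),
  ("church", "place_of_worship"), ("clothes", "shop"), ("convenience", "shop"),
  ("dance", "leisure"), ("drinking_water", "amenity"), ("fast_food", "amenity"),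
  ("fountain", "amenity"), ("gallery", "tourism"), ("garden", "leisure"),
  ("ice_cream", "amenity"), ("information", "tourism"), ("monument", "tourism"),
  ("museum", "tourism"), ("nature_reserve", "leisure"), ("nightclub", "amenity"),
  ("park", "leisure"), ("pitch", "leisure"), ("place_of_worship", "place_of_worship"),
  ("pub", "amenity"), ("restaurant", "amenity"), ("shop", "shop"),
  ("sports_centre", "leisure"), ("stadium", "leisure"), ("supermarket", "shop"),
  ("temple", "place_of_worship"), ("toilets", "amenity")]

-- A: for each poi, key = mapping.get(poi); if key (truthy: some non-empty string) then
-- categorized.setdefault(key, []).append(poi) else same under "unknown".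
-- setdefault(k, []).append(poi) is exactly Dict.modify k [] (· ++ [poi]).
def categorize_pois (poi_list : List String) : List (String × List String) :=
  (poi_list.foldl (fun categorized poi =>
      match pvMapping.get? poi with
      | some key => if key ≠ "" then categorized.modify key [] (· ++ [poi])
                    else categorized.modify "unknown" [] (· ++ [poi])
      | none => categorized.modify "unknown" [] (· ++ [poi]))
    PySem.Dict.empty).items

-- ===== PORT B =====
-- B's inverse table: category → its member POIs
def pvGroups : List (String × List String) := [
  ("tourism", ["art_centre", "castle", "gallery", "information",
               "monument", "museum"]),
  ("amenity", ["bakery", "bar", "biergarten", "bench", "cafe", "cinema",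
               "drinking_water", "fast_food", "fountain", "ice_cream",
               "nightclub", "pub", "restaurant", "toilets"]),
  ("shop", ["books", "clothes", "convenience", "shop", "supermarket"]),
  ("place_of_worship", ["church", "place_of_worship", "temple"]),
  ("leisure", ["dance", "garden", "nature_reserve", "park", "pitch",
               "sports_centre", "stadium"])]

-- the inner 'for c, members in groups.items(): if p in members: return c / return "unknown"'
def pvCategory (p : String) : String :=
  (pvGroups.findSome? (fun cm => if cm.2.contains p then some cm.1 else none)).getD "unknown"

def categorize_pois_alt (poi_list : List String) : List (String × List String) :=
  let pairs := poi_list.map (fun p => (pvCategory p, p))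
  let seen := pairs.foldl (fun s cp => if s.contains cp.1 then s else s ++ [cp.1]) []
  seen.map (fun c => (c, (pairs.filter (fun cp => cp.1 == c)).map (·.2)))

-- ===== PRECONDITION & SPEC =====
def Spec_categorize_pois (poi_list : List String) (out : List (String × List String)) : Prop := out = categorize_pois_alt poi_list
instance (poi_list : List String) (out : List (String × List String)) : Decidable (Spec_categorize_pois poi_list out) := by unfold Spec_categorize_pois; infer_instance

-- ===== CLAIM (what is proved, stated in full; the proofs are below) =====
def Claim_equal_categorize_pois : Prop := ∀ (poi_list : List String), Dom_categorize_pois poi_list → Spec_categorize_pois poi_list (categorize_pois poi_list)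

-- ===== LEMMAS AND PROOFS =====

-- the category A buckets a poi under
def pvCat (p : String) : String := (pvMapping.get? p).getD "unknown"

-- every value stored in the mapping is a non-empty string
theorem pvMapping_val_ne (p v : String) (h : pvMapping.get? p = some v) : v ≠ "" := by
  have hm := PySem.Dict.mem_items_of_get?_eq_some (d := pvMapping) h
  have hv : v ∈ (pvMapping.items).map Prod.snd := List.mem_map_of_mem hm
  have hall : ∀ x ∈ (pvMapping.items).map Prod.snd, x ≠ "" := by decide
  exact hall v hv

-- A's branching step is exactly "modify at pvCat p"
theorem stepA_eq (d : PySem.Dict String (List String)) (p : String) :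
    (match pvMapping.get? p with
      | some key => if key ≠ "" then d.modify key [] (· ++ [p])
                    else d.modify "unknown" [] (· ++ [p])
      | none => d.modify "unknown" [] (· ++ [p]))
    = d.modify (pvCat p) [] (· ++ [p]) := by
  unfold pvCat
  cases h : pvMapping.get? p with
  | none => simp
  | some v => simp [pvMapping_val_ne p v h]

theorem foldlA_eq (poi_list : List String) :
    poi_list.foldl (fun categorized poi =>
      match pvMapping.get? poi with
      | some key => if key ≠ "" then categorized.modify key [] (· ++ [poi])
                    else categorized.modify "unknown" [] (· ++ [poi])
      | none => categorized.modify "unknown" [] (· ++ [poi])) PySem.Dict.empty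
    = poi_list.foldl (fun d p => d.modify (pvCat p) [] (· ++ [p])) PySem.Dict.empty := by
  apply PySem.List.foldl_congr_mem
  intro d p _
  exact stepA_eq d p

theorem getD_foldlA (poi_list : List String) (c : String) :
    (poi_list.foldl (fun d p => d.modify (pvCat p) [] (· ++ [p])) PySem.Dict.empty).getD c []
    = (poi_list.filter (fun p => pvCat p == c)) := by
  have h1 : poi_list.foldl (fun d p => d.modify (pvCat p) [] (· ++ [p])) PySem.Dict.empty
      = (poi_list.map (fun p => (pvCat p, p))).foldl
          (fun d q => d.modify q.1 [] (· ++ [q.2])) PySem.Dict.empty := by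
    rw [List.foldl_map]
  rw [h1, PySem.Dict.getD_foldl_modify_append, List.filter_map]
  simp [Function.comp_def]

-- B's scan of the inverse table computes A's lookup category
theorem pvCategory_eq_pvCat (p : String) : pvCategory p = pvCat p := by
  by_cases hp : p ∈ pvMapping.keys
  · simp only [pvMapping, PySem.Dict.keys_mk, List.map_cons, List.map_nil] at hp
    fin_cases hp <;> rfl
  · have h1 : pvMapping.get? p = none :=
      (PySem.Dict.get?_eq_none_iff_not_mem_keys _ _).mpr hp
    simp only [pvMapping, PySem.Dict.keys_mk, List.map_cons, List.map_nil,
      List.mem_cons, List.not_mem_nil, or_false, not_or] at hp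
    simp [pvCategory, pvCat, pvGroups, h1, List.findSome?, hp]

-- B's 'seen' loop is the ordered dedup of the category sequence
theorem seen_eq_dedup (pairs : List (String × String)) :
    pairs.foldl (fun s cp => if s.contains cp.1 then s else s ++ [cp.1]) []
    = PySem.List.dedup (pairs.map (·.1)) := by
  rw [PySem.List.dedup_eq_ofList, PySem.Set.ofList_eq_foldl, List.foldl_map]
  rfl

-- ===== VERDICT (by name: the statement is the Claim_ definition above) =====
theorem categorize_pois_spec : Claim_equal_categorize_pois := by
  intro poi_list _
  unfold Spec_categorize_pois
  have hcat : (fun p => (pvCategory p, p)) = (fun p => (pvCat p, p)) := by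
    funext p; rw [pvCategory_eq_pvCat]
  -- B reduces to: dedup of the category sequence, one filter per category
  have hB : categorize_pois_alt poi_list
      = (PySem.List.dedup (poi_list.map pvCat)).map
          (fun c => (c, poi_list.filter (fun p => pvCat p == c))) := by
    show ((poi_list.map (fun p => (pvCategory p, p))).foldl
            (fun s cp => if s.contains cp.1 then s else s ++ [cp.1]) []).map
          (fun c => (c, ((poi_list.map (fun p => (pvCategory p, p))).filter
            (fun cp => cp.1 == c)).map (·.2))) = _
    rw [hcat, seen_eq_dedup]
    have hmap : (poi_list.map (fun p => (pvCat p, p))).map (·.1) = poi_list.map pvCat := by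
      simp
    rw [hmap]
    apply List.map_congr_left
    intro c _
    rw [List.filter_map]
    simp [Function.comp_def]
  rw [hB]
  -- A reduces to the same shape
  unfold categorize_pois
  rw [foldlA_eq]
  have hnd : (poi_list.foldl (fun d p => d.modify (pvCat p) [] (· ++ [p])) PySem.Dict.empty).keys.Nodup := by
    exact PySem.Dict.nodup_keys_foldl_modify_key poi_list pvCat [] (fun d p => (· ++ [p])) PySem.Dict.empty (by simp)
  rw [PySem.Dict.items_eq_map_keys _ hnd ([] : List String)]
  have hkeys : (poi_list.foldl (fun d p => d.modify (pvCat p) [] (· ++ [p])) PySem.Dict.empty).keys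
      = PySem.List.dedup (poi_list.map pvCat) := by
    rw [PySem.Dict.keys_foldl_modify_key]
    simp [PySem.Set.update_nil_left]
  rw [hkeys]
  apply List.map_congr_left
  intro c _
  rw [getD_foldlA]
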